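-- pv_equiv track=rewrite | github.com/alexander-ray/us_congress_communities | helper.py | generate_membership_list_from_party
-- ===== SOURCE A (Python) =====
-- def generate_membership_list_from_party(nodes):
--     """
--     Helper function to generate ordered list of group labels from Networkx nodeset
--
--     :param nodes: Networkx nodes
--     :return: ordered list of group labels
--     """
--     membership_dict = {}
--     membership_count = 0
--     s = []
--     for i in nodes:
--         party = nodes[i]['party']
--         # note that Zhang et al. assigns non-democrats to the the republican group
--         # We're going off real party
--         if party in membership_dict:
--             s.append(membership_dict[party])
--         else:
--             membership_dict[party] = membership_count
--             s.append(membership_count)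
--             membership_count += 1
--     return s
-- ===== SOURCE B (Python) =====
-- def generate_membership_list_from_party(nodes):
--     """Alternative closed-form re-implementation: the group id of a label is the
--     number of distinct labels appearing strictly before its first occurrence."""
--     labels = [nodes[i]['party'] for i in nodes]
--     return [len(set(labels[:labels.index(p)])) for p in labels]
-- ===== Notes on version B (the rewrite author's own statement) =====
-- stated objective: alternative
-- what changed: Drops the incremental dict-and-counter machinery entirely: each element's group id is computed by a closed-form characterization, the number of distinct labels strictly before that label's first occurrence (labels.index + set of the prefix), trading the O(n) stateful pass for a stateless O(n^2) per-element formula.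
import Mathlib
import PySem

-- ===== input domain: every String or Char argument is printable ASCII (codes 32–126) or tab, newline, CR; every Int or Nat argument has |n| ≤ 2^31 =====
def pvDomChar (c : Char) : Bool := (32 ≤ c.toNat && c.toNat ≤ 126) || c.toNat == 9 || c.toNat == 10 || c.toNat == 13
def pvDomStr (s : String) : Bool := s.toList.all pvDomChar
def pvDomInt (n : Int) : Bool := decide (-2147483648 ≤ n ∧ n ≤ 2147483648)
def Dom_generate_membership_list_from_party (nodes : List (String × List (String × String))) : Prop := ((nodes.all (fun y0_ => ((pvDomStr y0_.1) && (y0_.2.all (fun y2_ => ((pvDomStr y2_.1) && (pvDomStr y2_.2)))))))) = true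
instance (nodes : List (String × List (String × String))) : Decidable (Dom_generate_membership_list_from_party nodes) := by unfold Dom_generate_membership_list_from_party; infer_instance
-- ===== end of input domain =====

-- B drops A's incremental dict/counter loop: each element's id is computed closed-form as the number of distinct labels before its first occurrence (alternative algorithm; O(n^2) vs O(n)).


-- ===== PORT A =====
-- nodes[i]['party'] : attribute lookup in the node's attribute dict (KeyError excluded by Pre_)
def pvParty (i : String × List (String × String)) : String :=
  PySem.Dict.getD (PySem.Dict.mk i.2) "party" ""

def generate_membership_list_from_party (nodes : List (String × List (String × String))) : List Int :=
  let final := nodes.foldl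
    (fun (st : PySem.Dict String Int × Int × List Int) i =>
      let party := pvParty i
      if (st.1).contains party then
        (st.1, st.2.1, st.2.2 ++ [(st.1).getD party 0])
      else
        ((st.1).insert party st.2.1, st.2.1 + 1, st.2.2 ++ [st.2.1]))
    (PySem.Dict.empty, 0, [])
  final.2.2

-- ===== PORT B =====
-- len(set(labels[:labels.index(p)])) for each p in labels; p is drawn from labels,
-- so labels.index(p) never raises — the .getD 0 default is never taken.
def generate_membership_list_from_party_alt (nodes : List (String × List (String × String))) : List Int :=
  let labels := nodes.map pvParty
  labels.map (fun p =>
    ((PySem.Set.ofList (labels.take ((PySem.List.index? labels p).getD 0))).length : Int))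

-- ===== PRECONDITION & SPEC =====
-- Pre_ excludes (a) nodes whose attribute dict lacks a 'party' key, where A raises KeyError, and
-- (b) association lists with duplicate node ids or duplicate attribute keys, which a Python dict
-- cannot represent (duplicates collapse), so the assoc-list encoding of the input is accidental there.
def Pre_generate_membership_list_from_party (nodes : List (String × List (String × String))) : Prop :=
  (nodes.map (·.1)).Nodup ∧ ∀ p ∈ nodes, (p.2.map (·.1)).Nodup ∧ "party" ∈ p.2.map (·.1)
instance (nodes : List (String × List (String × String))) : Decidable (Pre_generate_membership_list_from_party nodes) := by unfold Pre_generate_membership_list_from_party; infer_instance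

def pvWitness_generate_membership_list_from_party : (List (String × List (String × String))) :=
  [("a", [("party", "D")]), ("b", [("party", "R")]), ("c", [("party", "D")])]

def Spec_generate_membership_list_from_party (nodes : List (String × List (String × String))) (out : List Int) : Prop := out = generate_membership_list_from_party_alt nodes
instance (nodes : List (String × List (String × String))) (out : List Int) : Decidable (Spec_generate_membership_list_from_party nodes out) := by unfold Spec_generate_membership_list_from_party; infer_instance

-- ===== CLAIM (what is proved, stated in full; the proofs are below) =====
def Claim_equal_generate_membership_list_from_party : Prop := ∀ (nodes : List (String × List (String × String))), Dom_generate_membership_list_from_party nodes → Pre_generate_membership_list_from_party nodes → Spec_generate_membership_list_from_party nodes (generate_membership_list_from_party nodes)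

-- ===== LEMMAS AND PROOFS =====

-- A's loop body at the level of the party label
def pvStep (st : PySem.Dict String Int × Int × List Int) (party : String) :
    PySem.Dict String Int × Int × List Int :=
  if (st.1).contains party then
    (st.1, st.2.1, st.2.2 ++ [(st.1).getD party 0])
  else
    ((st.1).insert party st.2.1, st.2.1 + 1, st.2.2 ++ [st.2.1])

-- A's per-label value: index of p in the ordered dedup of L
def pvG (L : List String) (p : String) : Int :=
  (((PySem.List.index? (PySem.List.dedup L) p).getD 0 : Nat) : Int)

lemma pv_A_eq_foldl (nodes : List (String × List (String × String))) :
    generate_membership_list_from_party nodes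
      = ((nodes.map pvParty).foldl pvStep (PySem.Dict.empty, 0, [])).2.2 := by
  rw [List.foldl_map]; rfl

lemma pv_idx_append_singleton (l : List String) (x : String) (hx : x ∉ l) (p : String) :
    PySem.List.index? (l ++ [x]) p = if p = x then some l.length else PySem.List.index? l p := by
  by_cases hpx : p = x
  · subst hpx
    rw [if_pos rfl, PySem.List.index?_append_singleton_self l p hx]
  · rw [if_neg hpx]
    by_cases hp : p ∈ l
    · exact PySem.List.index?_append_of_mem [x] hp
    · rw [(PySem.List.index?_eq_none_iff _ _).mpr hp,
        (PySem.List.index?_eq_none_iff _ _).mpr (by simp [hp, hpx])]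

lemma pv_dedup_prefix (ls rest : List String) :
    ∃ t, PySem.List.dedup (ls ++ rest) = PySem.List.dedup ls ++ t := by
  simp only [PySem.List.dedup_eq_ofList, PySem.Set.ofList_append,
    PySem.Set.update_eq_append_filter]
  exact ⟨_, rfl⟩

lemma pv_dedup_append_mem {ls : List String} {x : String} (hx : x ∈ ls) :
    PySem.List.dedup (ls ++ [x]) = PySem.List.dedup ls := by
  simp only [PySem.List.dedup_eq_ofList]
  rw [PySem.Set.ofList_append_singleton,
    PySem.Set.add_of_mem ((PySem.Set.mem_ofList _ _).mpr hx)]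

lemma pv_dedup_append_not_mem {ls : List String} {x : String} (hx : x ∉ ls) :
    PySem.List.dedup (ls ++ [x]) = PySem.List.dedup ls ++ [x] := by
  simp only [PySem.List.dedup_eq_ofList]
  rw [PySem.Set.ofList_append_singleton,
    PySem.Set.add_of_not_mem (fun h => hx ((PySem.Set.mem_ofList _ _).mp h))]

lemma pv_loop (rest : List String) :
    ∀ (ls : List String) (d : PySem.Dict String Int) (c : Int) (s : List Int),
      (∀ p, d.get? p = Option.map (fun n : Nat => (n : Int)) (PySem.List.index? (PySem.List.dedup ls) p)) →
      c = ((PySem.List.dedup ls).length : Int) →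
      (rest.foldl pvStep (d, c, s)).2.2 = s ++ rest.map (pvG (ls ++ rest)) := by
  induction rest with
  | nil => intro ls d c s _ _; simp
  | cons x rest' ih =>
    intro ls d c s hd hc
    have hcontains : d.contains x = true ↔ x ∈ ls := by
      have h1 : (Option.map (fun n : Nat => (n : Int))
            (PySem.List.index? (PySem.List.dedup ls) x)).isSome
          = (PySem.List.index? (PySem.List.dedup ls) x).isSome := by
        cases PySem.List.index? (PySem.List.dedup ls) x <;> rfl
      rw [PySem.Dict.contains_eq_isSome_get?, hd x, h1,
        PySem.List.index?_isSome_iff, PySem.List.mem_dedup]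
    have hsplit : ls ++ x :: rest' = (ls ++ [x]) ++ rest' := by simp
    by_cases hx : x ∈ ls
    · -- seen before
      have hxd : x ∈ PySem.List.dedup ls := by
        rw [PySem.List.dedup_eq_ofList]; exact (PySem.Set.mem_ofList _ _).mpr hx
      obtain ⟨k, hk⟩ := Option.isSome_iff_exists.mp ((PySem.List.index?_isSome_iff _ _).mpr hxd)
      have hval : d.getD x 0 = (k : Int) := by
        rw [PySem.Dict.getD_eq_get?_getD, hd x, hk]; rfl
      have hstep : pvStep (d, c, s) x = (d, c, s ++ [(k : Int)]) := by
        simp [pvStep, hcontains, hx, hval]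
      have hded : PySem.List.dedup (ls ++ [x]) = PySem.List.dedup ls := pv_dedup_append_mem hx
      have hGx : pvG (ls ++ x :: rest') x = (k : Int) := by
        obtain ⟨t, ht⟩ := pv_dedup_prefix (ls ++ [x]) rest'
        rw [pvG, hsplit, ht, hded, PySem.List.index?_append_of_mem t hxd, hk]; rfl
      have := ih (ls ++ [x]) d c (s ++ [(k : Int)])
        (by intro p; rw [hd p, hded]) (by rw [hc, hded])
      rw [List.foldl_cons, hstep, this, hsplit]
      simp [hGx]
    · -- new party
      have hxd : x ∉ PySem.List.dedup ls := by
        rw [PySem.List.dedup_eq_ofList]; exact fun h => hx ((PySem.Set.mem_ofList _ _).mp h)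
      have hstep : pvStep (d, c, s) x = (d.insert x c, c + 1, s ++ [c]) := by
        simp [pvStep, hcontains, hx]
      have hded : PySem.List.dedup (ls ++ [x]) = PySem.List.dedup ls ++ [x] :=
        pv_dedup_append_not_mem hx
      have hd' : ∀ p, (d.insert x c).get? p
          = Option.map (fun n : Nat => (n : Int)) (PySem.List.index? (PySem.List.dedup (ls ++ [x])) p) := by
        intro p
        rw [PySem.Dict.get?_insert, hded, pv_idx_append_singleton _ _ hxd p]
        by_cases hpx : p = x
        · simp [hpx, hc]
        · simp [hpx, hd p]
      have hc' : c + 1 = ((PySem.List.dedup (ls ++ [x])).length : Int) := by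
        rw [hded]; simp [hc]
      have hGx : pvG (ls ++ x :: rest') x = c := by
        obtain ⟨t, ht⟩ := pv_dedup_prefix (ls ++ [x]) rest'
        have hmem : x ∈ PySem.List.dedup (ls ++ [x]) := by rw [hded]; simp
        rw [pvG, hsplit, ht, PySem.List.index?_append_of_mem t hmem, hded,
          pv_idx_append_singleton _ _ hxd x, if_pos rfl]
        simp [hc]
      have := ih (ls ++ [x]) (d.insert x c) (c + 1) (s ++ [c]) hd' hc'
      rw [List.foldl_cons, hstep, this, hsplit]
      simp [hGx]

-- B's closed form equals A's dedup-index: the position of p in dedup L is the number of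
-- distinct elements strictly before p's first occurrence in L.
lemma pv_closed_form {L : List String} {p : String} (hp : p ∈ L) :
    pvG L p
      = ((PySem.Set.ofList (L.take ((PySem.List.index? L p).getD 0))).length : Int) := by
  obtain ⟨k, hk⟩ := Option.isSome_iff_exists.mp ((PySem.List.index?_isSome_iff _ _).mpr hp)
  obtain ⟨pre, suf, hLeq, hlen, hpre⟩ := (PySem.List.index?_eq_some_iff _ _ _).mp hk
  have htake : L.take k = pre := by
    subst hLeq hlen; simp
  have hpned : p ∉ PySem.List.dedup pre := by
    rw [PySem.List.mem_dedup]; exact hpre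
  have hded1 : PySem.List.dedup (pre ++ [p]) = PySem.List.dedup pre ++ [p] :=
    pv_dedup_append_not_mem hpre
  have hidx : PySem.List.index? (PySem.List.dedup L) p
      = some (PySem.List.dedup pre).length := by
    have hsplit : L = (pre ++ [p]) ++ suf := by rw [hLeq]; simp
    obtain ⟨t, ht⟩ := pv_dedup_prefix (pre ++ [p]) suf
    have hmem : p ∈ PySem.List.dedup (pre ++ [p]) := by rw [hded1]; simp
    rw [hsplit, ht, PySem.List.index?_append_of_mem t hmem, hded1,
      pv_idx_append_singleton _ _ hpned p, if_pos rfl]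
  rw [pvG, hidx, hk, Option.getD_some, Option.getD_some, htake,
    ← PySem.List.dedup_eq_ofList]

-- ===== VERDICT (by name: the statement is the Claim_ definition above) =====
theorem generate_membership_list_from_party_spec : Claim_equal_generate_membership_list_from_party := by
  intro nodes _ _
  unfold Spec_generate_membership_list_from_party
  rw [pv_A_eq_foldl]
  have h := pv_loop (nodes.map pvParty) [] PySem.Dict.empty 0 []
    (by intro p; rfl) (by rfl)
  rw [h]
  simp only [List.nil_append, generate_membership_list_from_party_alt]
  exact List.map_congr_left (fun p hp => pv_closed_form hp)
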